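-- pv_equiv track=rewrite | github.com/SM981/hotel-tech-readiness-api | interpretation.py | build_gap_register
-- ===== SOURCE A (Python) =====
-- from typing import Any, Dict, List
--
-- def _present_vendor(stack_rows: List[Dict[str, Any]], category: str) -> bool:
--     for r in stack_rows:
--         if r.get("category") == category:
--             ev = r.get("evidence_level")
--             vendor = (r.get("vendor") or "").strip().lower()
--             if ev in {"confirmed_self_reported", "confirmed_evidence_backed"} and vendor not in {"none", "not provided"}:
--                 return True
--     return False
--
-- def build_gap_register(
--     stack_rows: List[Dict[str, Any]],
--     integration_rows: List[Dict[str, Any]],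
-- ) -> List[Dict[str, Any]]:
--     """
--     Builds CEO-valid gaps only:
--     - fact
--     - symptom
--     - decision impaired
--     - risk
--     - owner function
--     - close-gap action (not a tool yet)
--
--     No guessing. If inputs don't support the fields, do not create the gap.
--     """
--     gaps: List[Dict[str, Any]] = []
--
--     # Example: Missing BI
--     if not _present_vendor(stack_rows, "reporting_bi"):
--         gaps.append(
--             {
--                 "gap_name": "No central reporting view",
--                 "missing_or_broken_fact": "No reporting/BI tool is confirmed as in use.",
--                 "operational_symptom": "Leadership reporting relies on manual collation or separate system exports.",
--                 "decision_impaired": "Leadership cannot reliably answer performance questions from one consistent source.",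
--                 "risk_if_unchanged": "Decisions are slower and may be disputed due to inconsistent numbers.",
--                 "owner_function": "leadership",
--                 "close_gap_action": "Confirm current reporting approach and define a single set of KPIs and data sources before selecting or enabling a reporting solution.",
--                 "trigger": "system_missing",
--             }
--         )
--
--     # Example: Unknown integrations as a gap only if it blocks decisions (always does for CEO-level)
--     unknown_links = [r for r in integration_rows if r.get("status") == "unknown_not_confirmed"]
--     if unknown_links:
--         gaps.append(
--             {
--                 "gap_name": "Integration status not confirmed",
--                 "missing_or_broken_fact": "Core data flows have not been confirmed as active or inactive.",
--                 "operational_symptom": "Teams may be rekeying data or reconciling reports, but this cannot be stated until confirmed.",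
--                 "decision_impaired": "Leadership cannot determine where data breaks and where manual effort is being applied.",
--                 "risk_if_unchanged": "You risk investing in new tools before confirming what can be enabled within the current stack.",
--                 "owner_function": "leadership",
--                 "close_gap_action": "Confirm each core integration as Active or Not active, and document where manual work occurs today.",
--                 "trigger": "process_gap_confirmed",
--             }
--         )
--
--     # Example: Missing RMS
--     if not _present_vendor(stack_rows, "rms"):
--         gaps.append(
--             {
--                 "gap_name": "No confirmed revenue management system",
--                 "missing_or_broken_fact": "No RMS is confirmed as in use.",
--                 "operational_symptom": "Pricing and forecasting may be handled manually or within PMS tools; configuration is not confirmed.",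
--                 "decision_impaired": "Revenue leadership cannot confirm whether pricing decisions are automated, consistent, and auditable.",
--                 "risk_if_unchanged": "Pricing may become reactive and inconsistent across properties, particularly in high-demand periods.",
--                 "owner_function": "revenue",
--                 "close_gap_action": "Confirm how pricing decisions are made today and whether the current PMS/channel tooling provides sufficient automation before adding an RMS.",
--                 "trigger": "system_missing",
--             }
--         )
--
--     return gaps
-- ===== SOURCE B (Python) =====
-- from typing import Any, Dict, List
--
-- _GAP_BI = {
--     "gap_name": "No central reporting view",
--     "missing_or_broken_fact": "No reporting/BI tool is confirmed as in use.",
--     "operational_symptom": "Leadership reporting relies on manual collation or separate system exports.",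
--     "decision_impaired": "Leadership cannot reliably answer performance questions from one consistent source.",
--     "risk_if_unchanged": "Decisions are slower and may be disputed due to inconsistent numbers.",
--     "owner_function": "leadership",
--     "close_gap_action": "Confirm current reporting approach and define a single set of KPIs and data sources before selecting or enabling a reporting solution.",
--     "trigger": "system_missing",
-- }
--
-- _GAP_INTEGRATIONS = {
--     "gap_name": "Integration status not confirmed",
--     "missing_or_broken_fact": "Core data flows have not been confirmed as active or inactive.",
--     "operational_symptom": "Teams may be rekeying data or reconciling reports, but this cannot be stated until confirmed.",
--     "decision_impaired": "Leadership cannot determine where data breaks and where manual effort is being applied.",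
--     "risk_if_unchanged": "You risk investing in new tools before confirming what can be enabled within the current stack.",
--     "owner_function": "leadership",
--     "close_gap_action": "Confirm each core integration as Active or Not active, and document where manual work occurs today.",
--     "trigger": "process_gap_confirmed",
-- }
--
-- _GAP_RMS = {
--     "gap_name": "No confirmed revenue management system",
--     "missing_or_broken_fact": "No RMS is confirmed as in use.",
--     "operational_symptom": "Pricing and forecasting may be handled manually or within PMS tools; configuration is not confirmed.",
--     "decision_impaired": "Revenue leadership cannot confirm whether pricing decisions are automated, consistent, and auditable.",
--     "risk_if_unchanged": "Pricing may become reactive and inconsistent across properties, particularly in high-demand periods.",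
--     "owner_function": "revenue",
--     "close_gap_action": "Confirm how pricing decisions are made today and whether the current PMS/channel tooling provides sufficient automation before adding an RMS.",
--     "trigger": "system_missing",
-- }
--
-- def build_gap_register(
--     stack_rows: List[Dict[str, Any]],
--     integration_rows: List[Dict[str, Any]],
-- ) -> List[Dict[str, Any]]:
--     # One pass: collect every category backed by confirmed evidence and a real vendor.
--     present = set()
--     for r in stack_rows:
--         ev = r.get("evidence_level")
--         vendor = (r.get("vendor") or "").strip().lower()
--         if ev in {"confirmed_self_reported", "confirmed_evidence_backed"} and vendor not in {"none", "not provided"}: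
--             cat = r.get("category")
--             if cat is not None:
--                 present.add(cat)
--
--     gaps: List[Dict[str, Any]] = []
--     if "reporting_bi" not in present:
--         gaps.append(dict(_GAP_BI))
--     if any(r.get("status") == "unknown_not_confirmed" for r in integration_rows):
--         gaps.append(dict(_GAP_INTEGRATIONS))
--     if "rms" not in present:
--         gaps.append(dict(_GAP_RMS))
--     return gaps
-- ===== Notes on version B (the rewrite author's own statement) =====
-- stated objective: simpler
-- what changed: Replaces the two per-category rescans of stack_rows (_present_vendor) with a single pass that builds a set of confirmed-vendor categories, and the materialised filter of integration_rows with an any(); the three gap dicts become module-level templates.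
import Mathlib
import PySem

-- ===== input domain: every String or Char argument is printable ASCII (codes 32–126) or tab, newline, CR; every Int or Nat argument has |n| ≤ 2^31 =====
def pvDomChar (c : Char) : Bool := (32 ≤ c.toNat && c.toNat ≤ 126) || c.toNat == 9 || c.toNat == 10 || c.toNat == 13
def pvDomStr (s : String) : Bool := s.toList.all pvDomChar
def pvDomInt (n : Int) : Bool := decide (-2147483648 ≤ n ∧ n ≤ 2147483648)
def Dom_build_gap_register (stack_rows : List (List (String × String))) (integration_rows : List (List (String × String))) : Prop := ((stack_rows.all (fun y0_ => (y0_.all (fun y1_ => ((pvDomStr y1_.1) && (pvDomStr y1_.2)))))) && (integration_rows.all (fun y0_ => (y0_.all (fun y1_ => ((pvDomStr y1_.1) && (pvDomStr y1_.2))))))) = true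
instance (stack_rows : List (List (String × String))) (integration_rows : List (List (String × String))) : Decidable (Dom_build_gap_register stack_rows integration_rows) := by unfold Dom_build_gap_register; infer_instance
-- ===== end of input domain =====

-- ===== PORT A =====
-- B differs from A: one set-building pass over stack_rows replaces the two per-category rescans (objective: simpler).
def gapBI : List (String × String) :=
  [("gap_name", "No central reporting view"),
   ("missing_or_broken_fact", "No reporting/BI tool is confirmed as in use."),
   ("operational_symptom", "Leadership reporting relies on manual collation or separate system exports."),
   ("decision_impaired", "Leadership cannot reliably answer performance questions from one consistent source."),
   ("risk_if_unchanged", "Decisions are slower and may be disputed due to inconsistent numbers."),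
   ("owner_function", "leadership"),
   ("close_gap_action", "Confirm current reporting approach and define a single set of KPIs and data sources before selecting or enabling a reporting solution."),
   ("trigger", "system_missing")]

def gapIntegrations : List (String × String) :=
  [("gap_name", "Integration status not confirmed"),
   ("missing_or_broken_fact", "Core data flows have not been confirmed as active or inactive."),
   ("operational_symptom", "Teams may be rekeying data or reconciling reports, but this cannot be stated until confirmed."),
   ("decision_impaired", "Leadership cannot determine where data breaks and where manual effort is being applied."),
   ("risk_if_unchanged", "You risk investing in new tools before confirming what can be enabled within the current stack."),
   ("owner_function", "leadership"),
   ("close_gap_action", "Confirm each core integration as Active or Not active, and document where manual work occurs today."),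
   ("trigger", "process_gap_confirmed")]

def gapRMS : List (String × String) :=
  [("gap_name", "No confirmed revenue management system"),
   ("missing_or_broken_fact", "No RMS is confirmed as in use."),
   ("operational_symptom", "Pricing and forecasting may be handled manually or within PMS tools; configuration is not confirmed."),
   ("decision_impaired", "Revenue leadership cannot confirm whether pricing decisions are automated, consistent, and auditable."),
   ("risk_if_unchanged", "Pricing may become reactive and inconsistent across properties, particularly in high-demand periods."),
   ("owner_function", "revenue"),
   ("close_gap_action", "Confirm how pricing decisions are made today and whether the current PMS/channel tooling provides sufficient automation before adding an RMS."),
   ("trigger", "system_missing")]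

def rowGet (r : List (String × String)) (k : String) : Option String :=
  (PySem.Dict.mk r).get? k

-- literal port of _present_vendor: scan for the first row of this category with confirmed evidence and a real vendor
def presentVendor (stack_rows : List (List (String × String))) (category : String) : Bool :=
  match stack_rows with
  | [] => false
  | r :: rest =>
    if rowGet r "category" == some category then
      let ev := rowGet r "evidence_level"
      let vendor := PySem.Str.lower (PySem.Str.strip ((rowGet r "vendor").getD ""))
      if (ev == some "confirmed_self_reported" || ev == some "confirmed_evidence_backed")
          && !(vendor == "none" || vendor == "not provided") then
        true
      else
        presentVendor rest category
    else
      presentVendor rest category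

def build_gap_register (stack_rows : List (List (String × String))) (integration_rows : List (List (String × String))) : List (List (String × String)) :=
  let gaps : List (List (String × String)) := []
  let gaps := if !presentVendor stack_rows "reporting_bi" then gaps ++ [gapBI] else gaps
  let unknown_links := integration_rows.filter (fun r => rowGet r "status" == some "unknown_not_confirmed")
  let gaps := if !unknown_links.isEmpty then gaps ++ [gapIntegrations] else gaps
  let gaps := if !presentVendor stack_rows "rms" then gaps ++ [gapRMS] else gaps
  gaps

-- ===== PORT B =====
-- one pass over stack_rows: the set of categories with confirmed evidence and a real vendor
def presentSet (stack_rows : List (List (String × String))) : PySem.Set String :=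
  stack_rows.foldl (fun acc r =>
    let ev := rowGet r "evidence_level"
    let vendor := PySem.Str.lower (PySem.Str.strip ((rowGet r "vendor").getD ""))
    if (ev == some "confirmed_self_reported" || ev == some "confirmed_evidence_backed")
        && !(vendor == "none" || vendor == "not provided") then
      match rowGet r "category" with
      | some cat => PySem.Set.add acc cat
      | none => acc
    else acc) PySem.Set.empty

def build_gap_register_alt (stack_rows : List (List (String × String))) (integration_rows : List (List (String × String))) : List (List (String × String)) :=
  let present := presentSet stack_rows
  (if !PySem.Set.contains present "reporting_bi" then [gapBI] else []) ++
  (if integration_rows.any (fun r => rowGet r "status" == some "unknown_not_confirmed") then [gapIntegrations] else []) ++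
  (if !PySem.Set.contains present "rms" then [gapRMS] else [])

-- ===== PRECONDITION & SPEC =====
def Spec_build_gap_register (stack_rows : List (List (String × String))) (integration_rows : List (List (String × String))) (out : List (List (String × String))) : Prop := out = build_gap_register_alt stack_rows integration_rows
instance (stack_rows : List (List (String × String))) (integration_rows : List (List (String × String))) (out : List (List (String × String))) : Decidable (Spec_build_gap_register stack_rows integration_rows out) := by unfold Spec_build_gap_register; infer_instance

-- ===== CLAIM (what is proved, stated in full; the proofs are below) =====
def Claim_equal_build_gap_register : Prop := ∀ (stack_rows : List (List (String × String))) (integration_rows : List (List (String × String))), Dom_build_gap_register stack_rows integration_rows → Spec_build_gap_register stack_rows integration_rows (build_gap_register stack_rows integration_rows)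

-- ===== LEMMAS AND PROOFS =====

-- membership in B's fold-built set agrees with A's per-category scan
theorem mem_presentSet_foldl (rows : List (List (String × String))) (c : String)
    (acc : PySem.Set String) :
    c ∈ (rows.foldl (fun acc r =>
        let ev := rowGet r "evidence_level"
        let vendor := PySem.Str.lower (PySem.Str.strip ((rowGet r "vendor").getD ""))
        if (ev == some "confirmed_self_reported" || ev == some "confirmed_evidence_backed")
            && !(vendor == "none" || vendor == "not provided") then
          match rowGet r "category" with
          | some cat => PySem.Set.add acc cat
          | none => acc
        else acc) acc)
      ↔ (c ∈ acc ∨ presentVendor rows c = true) := by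
  induction rows generalizing acc with
  | nil => simp [presentVendor]
  | cons r rest ih =>
    simp only [List.foldl_cons, presentVendor]
    by_cases hcond : ((rowGet r "evidence_level" == some "confirmed_self_reported"
          || rowGet r "evidence_level" == some "confirmed_evidence_backed")
        && !(PySem.Str.lower (PySem.Str.strip ((rowGet r "vendor").getD "")) == "none"
          || PySem.Str.lower (PySem.Str.strip ((rowGet r "vendor").getD "")) == "not provided")) = true
    · rcases hget : rowGet r "category" with _ | cat
      · simp only [hcond, if_true, ih]
        simp
      · by_cases hc : cat = c
        · subst hc
          simp only [hcond, if_true, ih, PySem.Set.mem_add]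
          simp
        · simp only [hcond, if_true, ih, PySem.Set.mem_add]
          have hbe : (some cat == some c) = false := by simp [hc]
          have hc' : ¬ c = cat := fun h => hc h.symm
          simp [hbe, hc']
    · simp only [hcond, ih]
      rcases hget : rowGet r "category" with _ | cat
      · simp
      · by_cases hc : cat = c
        · subst hc; simp
        · have : (some cat == some c) = false := by simp [hc]
          simp [this]

theorem presentSet_spec (rows : List (List (String × String))) (c : String) :
    PySem.Set.contains (presentSet rows) c = presentVendor rows c := by
  rw [Bool.eq_iff_iff, PySem.Set.contains_iff]
  have h := mem_presentSet_foldl rows c PySem.Set.empty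
  simpa [presentSet, PySem.Set.empty] using h

theorem filter_isEmpty_eq_not_any (l : List (List (String × String)))
    (p : List (String × String) → Bool) :
    (l.filter p).isEmpty = !l.any p := by
  induction l with
  | nil => simp
  | cons x xs ih => by_cases h : p x <;> simp [h, ih]

-- ===== VERDICT (by name: the statement is the Claim_ definition above) =====
theorem build_gap_register_spec : Claim_equal_build_gap_register := by
  intro stack_rows integration_rows _
  unfold Spec_build_gap_register build_gap_register build_gap_register_alt
  simp only [presentSet_spec, filter_isEmpty_eq_not_any, Bool.not_not]
  by_cases h1 : presentVendor stack_rows "reporting_bi" <;>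
  by_cases h2 : integration_rows.any (fun r => rowGet r "status" == some "unknown_not_confirmed") <;>
  by_cases h3 : presentVendor stack_rows "rms" <;>
    simp [h1, h2, h3]
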